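-- pv_equiv track=rewrite | github.com/Hetal2108/LocalRepo | Practical1.py | find_high_low_borw_bks
-- ===== SOURCE A (Python) =====
-- def find_high_low_borw_bks(lib_data):
--     highest = None
--     lowest = None
--     highest_book = ''
--     lowest_book = ''
--
--     for book in lib_data:
--         total = 0
--         for count in lib_data[book]:
--             total += count
--
--         if highest is None or total > highest:
--             highest = total
--             highest_book = book
--
--         if lowest is None or total < lowest:
--             lowest = total
--             lowest_book = book
--
--     return highest_book, lowest_book
-- ===== SOURCE B (Python) =====
-- def find_high_low_borw_bks(lib_data):
--     if not lib_data:
--         return '', ''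
--     totals = {book: sum(counts) for book, counts in lib_data.items()}
--     highest_book = max(totals, key=totals.get)
--     lowest_book = min(totals, key=totals.get)
--     return highest_book, lowest_book
-- ===== Notes on version B (the rewrite author's own statement) =====
-- stated objective: simpler
-- what changed: Replaces the single hand-written loop with None sentinels and four state variables by a totals comprehension followed by two library reductions max/min with key=totals.get (first-extremal keeps the tie-breaking), plus an explicit empty-dict guard.
import Mathlib
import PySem

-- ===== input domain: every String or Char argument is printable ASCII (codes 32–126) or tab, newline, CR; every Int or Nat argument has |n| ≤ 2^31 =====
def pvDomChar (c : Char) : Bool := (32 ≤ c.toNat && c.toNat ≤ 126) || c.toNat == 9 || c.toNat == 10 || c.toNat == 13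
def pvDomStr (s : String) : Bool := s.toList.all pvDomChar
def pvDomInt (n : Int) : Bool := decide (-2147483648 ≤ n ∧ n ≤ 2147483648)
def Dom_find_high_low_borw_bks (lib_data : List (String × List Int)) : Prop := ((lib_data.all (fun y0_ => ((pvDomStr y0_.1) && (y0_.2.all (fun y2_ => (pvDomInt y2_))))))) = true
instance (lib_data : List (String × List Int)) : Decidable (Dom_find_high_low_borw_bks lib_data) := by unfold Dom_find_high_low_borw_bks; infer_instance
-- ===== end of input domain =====

-- B replaces A's single hand-rolled loop (None sentinels, four state variables) by a totals
-- table plus two first-extremal max/min reductions with an empty-input guard: simpler decomposition.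


-- ===== PORT A =====
-- one step of A's loop body: total = sum of counts, then the two sentinel updates in order
def pvStepA (st : Option Int × Option Int × String × String) (p : String × List Int) :
    Option Int × Option Int × String × String :=
  let total := p.2.foldl (fun a c => a + c) 0
  let highest := st.1
  let lowest := st.2.1
  let hb := st.2.2.1
  let lb := st.2.2.2
  let hp : Option Int × String :=
    match highest with
    | none => (some total, p.1)
    | some h => if total > h then (some total, p.1) else (some h, hb)
  let lp : Option Int × String :=
    match lowest with
    | none => (some total, p.1)
    | some lo => if total < lo then (some total, p.1) else (some lo, lb)
  (hp.1, lp.1, hp.2, lp.2)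

def find_high_low_borw_bks (lib_data : List (String × List Int)) : String × String :=
  let st := lib_data.foldl pvStepA (none, none, "", "")
  (st.2.2.1, st.2.2.2)

-- ===== PORT B =====
def find_high_low_borw_bks_alt (lib_data : List (String × List Int)) : String × String :=
  if lib_data = [] then ("", "")
  else
    let totals := lib_data.map (fun p => (p.1, p.2.sum))
    (((PySem.List.max? totals (fun q => q.2)).map Prod.fst).getD "",
     ((PySem.List.min? totals (fun q => q.2)).map Prod.fst).getD "")

-- ===== PRECONDITION & SPEC =====
def Spec_find_high_low_borw_bks (lib_data : List (String × List Int)) (out : String × String) : Prop := out = find_high_low_borw_bks_alt lib_data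
instance (lib_data : List (String × List Int)) (out : String × String) : Decidable (Spec_find_high_low_borw_bks lib_data out) := by unfold Spec_find_high_low_borw_bks; infer_instance

-- ===== CLAIM (what is proved, stated in full; the proofs are below) =====
def Claim_equal_find_high_low_borw_bks : Prop := ∀ (lib_data : List (String × List Int)), Dom_find_high_low_borw_bks lib_data → Spec_find_high_low_borw_bks lib_data (find_high_low_borw_bks lib_data)

-- ===== LEMMAS AND PROOFS =====

-- the max?/min? accumulator steps (definitionally the step of PySem.List.max?/min? with key = Prod.snd)
def pvStepMax (acc : Option (String × Int)) (q : String × Int) : Option (String × Int) :=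
  match acc with
  | none => some q
  | some m => if m.2 < q.2 then some q else some m

def pvStepMin (acc : Option (String × Int)) (q : String × Int) : Option (String × Int) :=
  match acc with
  | none => some q
  | some m => if q.2 < m.2 then some q else some m

-- view of a (max-acc, min-acc) pair as A's loop state
def pvConv (mh ml : Option (String × Int)) : Option Int × Option Int × String × String :=
  (mh.map Prod.snd, ml.map Prod.snd, mh.elim "" Prod.fst, ml.elim "" Prod.fst)

theorem pvStepA_conv (mh ml : Option (String × Int)) (p : String × List Int) :
    pvStepA (pvConv mh ml) p
      = pvConv (pvStepMax mh (p.1, p.2.foldl (fun a c => a + c) 0))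
               (pvStepMin ml (p.1, p.2.foldl (fun a c => a + c) 0)) := by
  rcases mh with _ | ⟨b, v⟩ <;> rcases ml with _ | ⟨b', v'⟩ <;>
    simp only [pvStepA, pvStepMax, pvStepMin, pvConv, Option.map, Option.elim] <;>
    split_ifs <;> simp_all [gt_iff_lt]

theorem pvFoldA_conv (l : List (String × List Int)) (mh ml : Option (String × Int)) :
    l.foldl pvStepA (pvConv mh ml)
      = pvConv ((l.map (fun p => (p.1, p.2.foldl (fun a c => a + c) 0))).foldl pvStepMax mh)
               ((l.map (fun p => (p.1, p.2.foldl (fun a c => a + c) 0))).foldl pvStepMin ml) := by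
  induction l generalizing mh ml with
  | nil => rfl
  | cons p t ih =>
      simp only [List.foldl_cons, List.map_cons, pvStepA_conv]
      exact ih _ _

theorem pvSum_foldl (xs : List Int) : ∀ a : Int, xs.foldl (fun a c => a + c) a = a + xs.sum := by
  induction xs with
  | nil => intro a; simp
  | cons x t ih => intro a; simp only [List.foldl_cons, ih, List.sum_cons]; ring

theorem pvOptElim (o : Option (String × Int)) : o.elim "" Prod.fst = (o.map Prod.fst).getD "" := by
  cases o <;> rfl

theorem pvTotals_eq (l : List (String × List Int)) :
    l.map (fun p => (p.1, p.2.foldl (fun a c => a + c) 0)) = l.map (fun p => (p.1, p.2.sum)) := by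
  simp [pvSum_foldl]

theorem pvMax?_eq (xs : List (String × Int)) :
    PySem.List.max? xs (fun q => q.2) = xs.foldl pvStepMax none := by
  unfold PySem.List.max?
  congr 1
  funext acc q
  cases acc <;> rfl

theorem pvMin?_eq (xs : List (String × Int)) :
    PySem.List.min? xs (fun q => q.2) = xs.foldl pvStepMin none := by
  unfold PySem.List.min?
  congr 1
  funext acc q
  cases acc <;> rfl

-- ===== VERDICT (by name: the statement is the Claim_ definition above) =====
theorem find_high_low_borw_bks_spec : Claim_equal_find_high_low_borw_bks := by
  intro lib_data _
  unfold Spec_find_high_low_borw_bks find_high_low_borw_bks find_high_low_borw_bks_alt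
  have hconv : (none, none, "", "") = pvConv none none := rfl
  rw [hconv, pvFoldA_conv]
  cases lib_data with
  | nil => rfl
  | cons p t =>
      simp only [if_neg (List.cons_ne_nil p t), pvTotals_eq, pvMax?_eq, pvMin?_eq, pvConv,
        pvOptElim]
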